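-- pv_equiv track=rewrite | github.com/itayglisko/AdvancedCalculator | utility_functions.py | valid_binary_opt
-- ===== SOURCE A (Python) =====
-- def regular_opt(ch: str) -> bool:
--     """
--     gets a char and checks if it's a unary operator or not
--     :param ch: a character from the lst
--     :return: true or false
--     """
--     match ch:
--         case '+' | '-' | '*' | '/' | '^' | '@' | '$' | '&' | '%':
--             return True
--     return False
--
-- def right_unary(ch: str) -> bool:
--     """
--     check if ch is a right unary symbol
--     :param ch: the char we are checking
--     :return: true or false
--     """
--     match ch:
--         case '!' | '#':
--             return True
--     return False
--
-- def left_unary(ch: str) -> bool: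
--     match ch:
--         case '~':
--             return True
--     return False
--
-- def is_number(x: any) -> bool:
--     """
--     checks if the parameter x is a number or not
--     :param x: the parameter we check if it is a number
--     :return: True if the x is a number else False
--     """
--     try:
--         float(x)
--         return True
--     except ValueError:
--         return False
--
-- def valid_binary_opt(lst: list) -> bool:
--     """
--     checks if the placement of the binary opt is correct
--     :param lst: list full of the user's index
--     :return: true ot false
--     """
--     lastidx = len(lst) - 1
--     for index, element in enumerate(lst):
--         if regular_opt(element):
--             if index == 0 or index == len(lst) - 1:
--                 return False
--             if index < lastidx:
--                 if not (lst[index + 1] == '(' or is_number(lst[index + 1]) or left_unary(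
--                         lst[index + 1])):
--                     return False
--             if not (is_number(lst[index - 1]) or lst[index - 1] == '(' or lst[index - 1] == ')' or right_unary(
--                     lst[index - 1])):
--                 return False
--     return True
-- ===== SOURCE B (Python) =====
-- def is_number(x) -> bool:
--     try:
--         float(x)
--         return True
--     except ValueError:
--         return False
--
-- _BAD = ('oo', 'lo', 'xo', 'oe', 'or', 'ox')
--
-- def _cat(tok):
--     # classify a token into a one-character category
--     if tok in ('+', '-', '*', '/', '^', '@', '$', '&', '%'):
--         return 'o'          # binary operator
--     if tok == '(':
--         return 'b'
--     if tok == ')':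
--         return 'e'
--     if tok == '~':
--         return 'l'          # left unary
--     if tok in ('!', '#'):
--         return 'r'          # right unary
--     if is_number(tok):
--         return 'n'
--     return 'x'              # anything else
--
-- def valid_binary_opt(lst: list) -> bool:
--     s = ''.join(map(_cat, lst))
--     if s and (s[0] == 'o' or s[-1] == 'o'):
--         return False
--     return not any(bad in s for bad in _BAD)
-- ===== Notes on version B (the rewrite author's own statement) =====
-- stated objective: alternative
-- what changed: B replaces A's indexed enumerate loop with neighbour lookups by a staged algorithm: first classify every token into a one-character category, join the categories into a string, then reject iff the category string starts or ends with the operator category or contains any of six forbidden two-character digrams found by substring search.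
import Mathlib
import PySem

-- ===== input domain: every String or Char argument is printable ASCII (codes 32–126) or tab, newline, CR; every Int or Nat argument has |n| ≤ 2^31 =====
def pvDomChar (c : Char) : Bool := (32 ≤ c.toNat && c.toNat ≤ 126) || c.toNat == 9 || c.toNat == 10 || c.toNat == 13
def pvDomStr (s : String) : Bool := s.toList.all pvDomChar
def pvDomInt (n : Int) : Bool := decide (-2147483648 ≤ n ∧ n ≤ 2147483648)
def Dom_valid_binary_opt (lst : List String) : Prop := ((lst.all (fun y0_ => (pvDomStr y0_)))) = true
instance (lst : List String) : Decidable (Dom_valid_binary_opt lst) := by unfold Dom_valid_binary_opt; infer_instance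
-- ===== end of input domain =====

-- B replaces A's indexed loop (neighbour lookups by index) by a staged algorithm: classify each
-- token into a one-character category, then reject iff the category string has an operator at
-- either end or contains one of six forbidden digrams; objective: alternative decomposition.


-- ===== PORT A =====
-- module helpers of A (regular_opt / right_unary / left_unary / is_number). The 'match' on
-- string literals is ported as an equality chain (exact).
def regular_opt (ch : String) : Bool :=
  ch == "+" || ch == "-" || ch == "*" || ch == "/" || ch == "^" || ch == "@" ||
  ch == "$" || ch == "&" || ch == "%"

def right_unary (ch : String) : Bool := ch == "!" || ch == "#"

def left_unary (ch : String) : Bool := ch == "~"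

-- is_number(x) = "float(x) does not raise ValueError". Ported by hand as Python's float-literal
-- grammar: strip whitespace, optional sign, then inf/infinity/nan (case-insensitive) or a
-- decimal mantissa (digits with single underscores between digits, optional single dot) with an
-- optional exponent. Exact on printable-ASCII strings (checked against CPython by fuzzing).
def pvIsDigit (c : Char) : Bool := '0' ≤ c && c ≤ '9'

def pvHasDoubleUnderscore : List Char → Bool
  | '_' :: '_' :: _ => true
  | _ :: rest => pvHasDoubleUnderscore rest
  | [] => false

-- nonempty digit run, underscores only between digits
def pvDigits1 (cs : List Char) : Bool :=
  !cs.isEmpty && pvIsDigit (cs.headD '_') && pvIsDigit (cs.getLastD '_') &&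
  cs.all (fun c => pvIsDigit c || c == '_') && !pvHasDoubleUnderscore cs

def pvIsPyWs (c : Char) : Bool :=
  c == ' ' || c == '\t' || c == '\n' || c == '\r' || c.toNat == 11 || c.toNat == 12

def pvStrip (cs : List Char) : List Char :=
  ((cs.dropWhile pvIsPyWs).reverse.dropWhile pvIsPyWs).reverse

def pvDropSign (cs : List Char) : List Char :=
  match cs with
  | c :: rest => if c == '+' || c == '-' then rest else cs
  | [] => []

def pvMantissa (m : List Char) : Bool :=
  let p := m.span (fun c => c != '.')
  if p.2.isEmpty then pvDigits1 m
  else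
    let ip := p.1
    let fp := p.2.tail
    if fp.any (fun c => c == '.') then false
    else (ip.isEmpty || pvDigits1 ip) && (fp.isEmpty || pvDigits1 fp) &&
         (!ip.isEmpty || !fp.isEmpty)

def pvFloatable (cs : List Char) : Bool :=
  let t := pvDropSign (pvStrip cs)
  let tl := PySem.Chars.lower t
  if tl == ['i','n','f'] || tl == ['i','n','f','i','n','i','t','y'] || tl == ['n','a','n'] then
    true
  else
    let q := t.span (fun c => c != 'e' && c != 'E')
    if q.2.isEmpty then pvMantissa t
    else pvMantissa q.1 && pvDigits1 (pvDropSign q.2.tail)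

def is_number (x : String) : Bool := pvFloatable x.toList

-- the enumerate loop of A, with A's early returns; lst is the whole list (for len and indexing)
def pvALoop (lst : List String) : List (Int × String) → Bool
  | [] => true
  | (index, element) :: rest =>
    if regular_opt element then
      if index == 0 || index == (lst.length : Int) - 1 then false
      else if decide (index < (lst.length : Int) - 1) &&
        !(((PySem.List.pyGet? lst (index + 1)).getD "") == "(" ||
          is_number ((PySem.List.pyGet? lst (index + 1)).getD "") ||
          left_unary ((PySem.List.pyGet? lst (index + 1)).getD "")) then false
      else if !(is_number ((PySem.List.pyGet? lst (index - 1)).getD "") ||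
          ((PySem.List.pyGet? lst (index - 1)).getD "") == "(" ||
          ((PySem.List.pyGet? lst (index - 1)).getD "") == ")" ||
          right_unary ((PySem.List.pyGet? lst (index - 1)).getD "")) then false
      else pvALoop lst rest
    else pvALoop lst rest

def valid_binary_opt (lst : List String) : Bool :=
  pvALoop lst (PySem.List.enumerate lst 0)

-- ===== PORT B =====
-- _cat: classify a token into a one-character category ('o' operator, 'b' '(', 'e' ')',
-- 'l' left unary, 'r' right unary, 'n' number, 'x' anything else)
def pvCat (tok : String) : Char :=
  if tok == "+" || tok == "-" || tok == "*" || tok == "/" || tok == "^" || tok == "@" ||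
     tok == "$" || tok == "&" || tok == "%" then 'o'
  else if tok == "(" then 'b'
  else if tok == ")" then 'e'
  else if tok == "~" then 'l'
  else if tok == "!" || tok == "#" then 'r'
  else if is_number tok then 'n'
  else 'x'

-- _BAD: the forbidden two-character digrams, as (first, second) pairs
def pvBAD : List (Char × Char) :=
  [('o','o'), ('l','o'), ('x','o'), ('o','e'), ('o','r'), ('o','x')]

-- 'a+b in s' for the two-character pattern a,b: substring search over the category string
def pvHasDigram (a b : Char) : List Char → Bool
  | x :: y :: rest => (x == a && y == b) || pvHasDigram a b (y :: rest)
  | _ => false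

def valid_binary_opt_alt (lst : List String) : Bool :=
  if !(lst.map pvCat).isEmpty &&
      ((lst.map pvCat).headD 'x' == 'o' || (lst.map pvCat).getLastD 'x' == 'o') then false
  else !(pvBAD.any (fun p => pvHasDigram p.1 p.2 (lst.map pvCat)))

-- ===== PRECONDITION & SPEC =====
def Spec_valid_binary_opt (lst : List String) (out : Bool) : Prop := out = valid_binary_opt_alt lst
instance (lst : List String) (out : Bool) : Decidable (Spec_valid_binary_opt lst out) := by unfold Spec_valid_binary_opt; infer_instance

-- ===== CLAIM (what is proved, stated in full; the proofs are below) =====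
def Claim_equal_valid_binary_opt : Prop := ∀ (lst : List String), Dom_valid_binary_opt lst → Spec_valid_binary_opt lst (valid_binary_opt lst)

-- ===== LEMMAS AND PROOFS =====

-- per-element pass condition of A's loop body (Bool, mirroring pvALoop's conditions)
def pvABool (lst : List String) (p : Int × String) : Bool :=
  !regular_opt p.2 ||
  (!(p.1 == 0 || p.1 == (lst.length : Int) - 1) &&
   !(decide (p.1 < (lst.length : Int) - 1) &&
     !(((PySem.List.pyGet? lst (p.1 + 1)).getD "") == "(" ||
       is_number ((PySem.List.pyGet? lst (p.1 + 1)).getD "") ||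
       left_unary ((PySem.List.pyGet? lst (p.1 + 1)).getD ""))) &&
   (is_number ((PySem.List.pyGet? lst (p.1 - 1)).getD "") ||
    ((PySem.List.pyGet? lst (p.1 - 1)).getD "") == "(" ||
    ((PySem.List.pyGet? lst (p.1 - 1)).getD "") == ")" ||
    right_unary ((PySem.List.pyGet? lst (p.1 - 1)).getD "")))

theorem pvABool_iff (lst : List String) (i : Int) (e : String) :
    pvABool lst (i, e) = true ↔
      (regular_opt e = true →
        (i ≠ 0 ∧ i ≠ (lst.length : Int) - 1) ∧
        (i < (lst.length : Int) - 1 →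
          (((PySem.List.pyGet? lst (i + 1)).getD "") == "(" ||
           is_number ((PySem.List.pyGet? lst (i + 1)).getD "") ||
           left_unary ((PySem.List.pyGet? lst (i + 1)).getD "")) = true) ∧
        (is_number ((PySem.List.pyGet? lst (i - 1)).getD "") ||
         ((PySem.List.pyGet? lst (i - 1)).getD "") == "(" ||
         ((PySem.List.pyGet? lst (i - 1)).getD "") == ")" ||
         right_unary ((PySem.List.pyGet? lst (i - 1)).getD "")) = true) := by
  cases hreg : regular_opt e with
  | false => simp [pvABool, hreg]
  | true =>
    simp only [pvABool, hreg, Bool.not_true, Bool.false_or, Bool.and_eq_true,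
      Bool.not_eq_true', Bool.or_eq_false_iff, Bool.and_eq_false_iff, beq_eq_false_iff_ne,
      decide_eq_false_iff_not, Bool.not_eq_false', forall_const, not_lt]
    constructor
    · rintro ⟨⟨⟨h1, h2⟩, h3⟩, h4⟩
      exact ⟨⟨h1, h2⟩, fun hlt => h3.resolve_left (by omega), h4⟩
    · rintro ⟨⟨h1, h2⟩, h3, h4⟩
      refine ⟨⟨⟨h1, h2⟩, ?_⟩, h4⟩
      by_cases hlt : i < (lst.length : Int) - 1
      · exact Or.inr (h3 hlt)
      · exact Or.inl (by omega)

theorem pvALoop_all (l : List (Int × String)) (lst : List String) :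
    pvALoop lst l = l.all (pvABool lst) := by
  induction l with
  | nil => rfl
  | cons p rest ih =>
    obtain ⟨i, e⟩ := p
    rw [List.all_cons]
    show (if regular_opt e then _ else _) = _
    by_cases h1 : regular_opt e = true
    · rw [if_pos h1]
      by_cases h2 : (i == 0 || i == (lst.length : Int) - 1) = true
      · rw [if_pos h2]
        have hhead : pvABool lst (i, e) = false := by
          simp only [pvABool]; rw [h1, h2]; simp
        rw [hhead, Bool.false_and]
      · rw [if_neg h2]
        rw [Bool.not_eq_true] at h2
        by_cases h3 : (decide (i < (lst.length : Int) - 1) &&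
            !(((PySem.List.pyGet? lst (i + 1)).getD "") == "(" ||
              is_number ((PySem.List.pyGet? lst (i + 1)).getD "") ||
              left_unary ((PySem.List.pyGet? lst (i + 1)).getD ""))) = true
        · rw [if_pos h3]
          have hhead : pvABool lst (i, e) = false := by
            simp only [pvABool]; rw [h1, h2, h3]; simp
          rw [hhead, Bool.false_and]
        · rw [Bool.not_eq_true] at h3
          rw [if_neg (by rw [h3]; simp)]
          by_cases h4 : (is_number ((PySem.List.pyGet? lst (i - 1)).getD "") ||
              ((PySem.List.pyGet? lst (i - 1)).getD "") == "(" ||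
              ((PySem.List.pyGet? lst (i - 1)).getD "") == ")" ||
              right_unary ((PySem.List.pyGet? lst (i - 1)).getD "")) = true
          · rw [if_neg (by rw [h4]; simp)]
            have hhead : pvABool lst (i, e) = true := by
              simp only [pvABool]; rw [h1, h2, h3, h4]; simp
            rw [hhead, Bool.true_and, ih]
          · rw [Bool.not_eq_true] at h4
            rw [if_pos (by rw [h4]; simp)]
            have hhead : pvABool lst (i, e) = false := by
              simp only [pvABool]; rw [h1, h2, h3, h4]; simp
            rw [hhead, Bool.false_and]
    · rw [if_neg h1]
      rw [Bool.not_eq_true] at h1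
      have hhead : pvABool lst (i, e) = true := by simp only [pvABool]; rw [h1]; simp
      rw [hhead, Bool.true_and, ih]

theorem pvEnum_getElem? {α : Type} (l : List α) (s : Int) (k : Nat) (h : k < l.length) :
    (PySem.List.enumerate l s)[k]? = some (s + k, l[k]) := by
  induction l generalizing s k with
  | nil => cases h
  | cons x xs ih =>
    rw [PySem.List.enumerate_cons]
    cases k with
    | zero => simp
    | succ k =>
      have hk : k < xs.length := by simpa using h
      simp only [List.getElem?_cons_succ, List.getElem_cons_succ]
      rw [ih (s + 1) k hk]
      have : s + 1 + (k : Int) = s + ((k + 1 : Nat) : Int) := by push_cast; ring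
      rw [this]

theorem pvEnum_all (l : List String) (s : Int) (f : Int × String → Bool) :
    (PySem.List.enumerate l s).all f = true ↔
      ∀ (k : Nat) (h : k < l.length), f (s + k, l[k]) = true := by
  rw [List.all_eq_true]
  constructor
  · intro H k h
    exact H _ (List.mem_of_getElem? (pvEnum_getElem? l s k h))
  · intro H x hx
    obtain ⟨i, hi, rfl⟩ := List.mem_iff_getElem.mp hx
    have hi' : i < l.length := by simpa [PySem.List.length_enumerate] using hi
    have h2 := pvEnum_getElem? l s i hi'
    rw [List.getElem?_eq_getElem hi, Option.some_inj] at h2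
    rw [h2]
    exact H i hi'

theorem pvA_char (lst : List String) :
    valid_binary_opt lst = true ↔
      ∀ (k : Nat) (h : k < lst.length), pvABool lst ((k : Int), lst[k]) = true := by
  unfold valid_binary_opt
  rw [pvALoop_all, pvEnum_all]
  simp

-- value of pyGet? at an in-range natural index
theorem pvGet_nat (lst : List String) (k : Nat) (h : k < lst.length) :
    (PySem.List.pyGet? lst (k : Int)).getD "" = lst[k] := by
  simp [pysem, List.getElem?_eq_getElem h]

-- ----- B-side characterisation -----

theorem pvHasDigram_iff (a b : Char) (s : List Char) :
    pvHasDigram a b s = true ↔ ∃ k, s[k]? = some a ∧ s[k + 1]? = some b := by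
  induction s with
  | nil =>
    simp [pvHasDigram]
  | cons x t ih =>
    cases t with
    | nil =>
      simp only [pvHasDigram]
      constructor
      · intro h; cases h
      · rintro ⟨k, h1, h2⟩
        rw [List.getElem?_eq_none (by simp)] at h2
        cases h2
    | cons y r =>
      rw [show pvHasDigram a b (x :: y :: r) =
            ((x == a && y == b) || pvHasDigram a b (y :: r)) from rfl]
      rw [Bool.or_eq_true, Bool.and_eq_true, beq_iff_eq, beq_iff_eq, ih]
      constructor
      · rintro (⟨rfl, rfl⟩ | ⟨k, h1, h2⟩)
        · exact ⟨0, by simp⟩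
        · exact ⟨k + 1, by simpa using h1, by simpa using h2⟩
      · rintro ⟨k, h1, h2⟩
        cases k with
        | zero =>
          left
          simp only [List.getElem?_cons_zero, Option.some_inj] at h1
          simp only [zero_add, List.getElem?_cons_succ, List.getElem?_cons_zero,
            Option.some_inj] at h2
          exact ⟨h1, h2⟩
        | succ k =>
          right
          exact ⟨k, by simpa using h1, by simpa using h2⟩

theorem pvNoBad_iff (s : List Char) :
    (pvBAD.any (fun p => pvHasDigram p.1 p.2 s)) = false ↔
      ∀ (k : Nat) (h : k + 1 < s.length), (s[k]'(by omega), s[k + 1]'h) ∉ pvBAD := by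
  rw [List.any_eq_false]
  constructor
  · intro H k hk hmem
    apply H _ hmem
    rw [pvHasDigram_iff]
    exact ⟨k, by rw [List.getElem?_eq_getElem (by omega)], by rw [List.getElem?_eq_getElem hk]⟩
  · intro H p hp hdig
    rw [pvHasDigram_iff] at hdig
    obtain ⟨k, h1, h2⟩ := hdig
    obtain ⟨hk1, he2⟩ := List.getElem?_eq_some_iff.mp h2
    obtain ⟨hk0, he1⟩ := List.getElem?_eq_some_iff.mp h1
    have : (s[k]'hk0, s[k + 1]'hk1) = p := by rw [he1, he2]
    exact H k hk1 (this ▸ hp)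

theorem pvCat_mem (t : String) : pvCat t ∈ ['o', 'b', 'e', 'l', 'r', 'n', 'x'] := by
  unfold pvCat
  split_ifs <;> simp

theorem pvCat_o (t : String) : (pvCat t == 'o') = regular_opt t := by
  unfold pvCat regular_opt
  split_ifs with h1 h2 h3 h4 h5 h6 <;> simp_all

theorem pvCat_next (t : String) :
    (pvCat t == 'b' || pvCat t == 'n' || pvCat t == 'l') =
      (t == "(" || is_number t || left_unary t) := by
  unfold pvCat left_unary
  split_ifs with h1 h2 h3 h4 h5 h6
  · simp only [Bool.or_eq_true, beq_iff_eq] at h1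
    rcases h1 with ((((((((rfl | rfl) | rfl) | rfl) | rfl) | rfl) | rfl) | rfl) | rfl) <;> decide
  · rw [beq_iff_eq] at h2; subst h2; decide
  · rw [beq_iff_eq] at h3; subst h3; decide
  · rw [beq_iff_eq] at h4; subst h4; decide
  · simp only [Bool.or_eq_true, beq_iff_eq] at h5
    rcases h5 with rfl | rfl <;> decide
  · simp [h2, h4, h6]
  · simp [h2, h4, h6]

theorem pvCat_prev (t : String) :
    (pvCat t == 'n' || pvCat t == 'b' || pvCat t == 'e' || pvCat t == 'r') =
      (is_number t || t == "(" || t == ")" || right_unary t) := by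
  unfold pvCat right_unary
  split_ifs with h1 h2 h3 h4 h5 h6
  · simp only [Bool.or_eq_true, beq_iff_eq] at h1
    rcases h1 with ((((((((rfl | rfl) | rfl) | rfl) | rfl) | rfl) | rfl) | rfl) | rfl) <;> decide
  · rw [beq_iff_eq] at h2; subst h2; decide
  · rw [beq_iff_eq] at h3; subst h3; decide
  · rw [beq_iff_eq] at h4; subst h4; decide
  · simp only [Bool.or_eq_true, beq_iff_eq] at h5
    rcases h5 with rfl | rfl <;> decide
  · simp [h2, h3, h5, h6]
  · simp [h2, h3, h5, h6]

theorem pvPairChar : ∀ x ∈ ['o', 'b', 'e', 'l', 'r', 'n', 'x'],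
    ∀ y ∈ ['o', 'b', 'e', 'l', 'r', 'n', 'x'],
    ((x, y) ∉ pvBAD ↔
      (((x == 'o') = true → (y == 'b' || y == 'n' || y == 'l') = true) ∧
       ((y == 'o') = true → (x == 'n' || x == 'b' || x == 'e' || x == 'r') = true))) := by
  intro x hx y hy
  fin_cases hx <;> fin_cases hy <;> simp [pvBAD]

-- a pair of adjacent categories is not forbidden iff A's two local conditions hold
theorem pvPair_iff (a b : String) :
    ((pvCat a, pvCat b) ∉ pvBAD) ↔
      (regular_opt a = true → (b == "(" || is_number b || left_unary b) = true) ∧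
      (regular_opt b = true →
        (is_number a || a == "(" || a == ")" || right_unary a) = true) := by
  rw [← pvCat_o a, ← pvCat_o b, ← pvCat_next b, ← pvCat_prev a]
  exact pvPairChar _ (pvCat_mem a) _ (pvCat_mem b)

theorem pvB_char (lst : List String) (hne : lst ≠ []) :
    valid_binary_opt_alt lst = true ↔
      regular_opt (lst[0]'(List.length_pos_iff.mpr hne)) = false ∧
      regular_opt (lst[lst.length - 1]'(by
        have := List.length_pos_iff.mpr hne; omega)) = false ∧
      ∀ (k : Nat) (h : k + 1 < lst.length),
        (pvCat (lst[k]'(by omega)), pvCat (lst[k + 1]'h)) ∉ pvBAD := by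
  have h0 : 0 < lst.length := List.length_pos_iff.mpr hne
  unfold valid_binary_opt_alt
  have hie : (lst.map pvCat).isEmpty = false := by
    simp [List.isEmpty_eq_false_iff, hne]
  have hhd : (lst.map pvCat).headD 'x' = pvCat (lst[0]'h0) := by
    rw [List.headD_eq_head?, List.head?_map, List.head?_eq_getElem?,
      List.getElem?_eq_getElem h0]
    rfl
  have hlast : (lst.map pvCat).getLastD 'x' = pvCat (lst[lst.length - 1]'(by omega)) := by
    rw [List.getLastD_eq_getLast?, List.getLast?_map, List.getLast?_eq_getElem?,
      List.getElem?_eq_getElem (by omega)]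
    rfl
  rw [hie, hhd, hlast]
  simp only [Bool.not_false, Bool.true_and]
  by_cases hc : ((pvCat (lst[0]'h0) == 'o') ||
      (pvCat (lst[lst.length - 1]'(by omega)) == 'o')) = true
  · rw [if_pos hc]
    constructor
    · intro h; cases h
    · rintro ⟨hb1, hb2, -⟩
      rw [← pvCat_o] at hb1 hb2
      rw [hb1, hb2] at hc
      cases hc
  · rw [if_neg hc]
    rw [Bool.not_eq_true, Bool.or_eq_false_iff] at hc
    obtain ⟨hc1, hc2⟩ := hc
    rw [Bool.not_eq_true', pvNoBad_iff]
    rw [← pvCat_o, hc1, ← pvCat_o, hc2] at *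
    constructor
    · intro H
      refine ⟨rfl, rfl, fun k hk => ?_⟩
      have := H k (by simpa using hk)
      simpa using this
    · rintro ⟨-, -, H⟩ k hk
      have hk' : k + 1 < lst.length := by simpa using hk
      have := H k hk'
      simpa using this

theorem pvMain (lst : List String) : valid_binary_opt lst = valid_binary_opt_alt lst := by
  by_cases hne : lst = []
  case pos => rw [hne]; rfl
  case neg =>
    have hn : 0 < lst.length := List.length_pos_iff.mpr hne
    apply Bool.coe_iff_coe.mp
    rw [pvA_char, pvB_char lst hne]
    constructor
    · -- A passes → B passes
      intro hA
      refine ⟨?_, ?_, ?_⟩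
      · cases hreg : regular_opt (lst[0]'hn) with
        | false => rfl
        | true =>
          exfalso
          have h0 := ((pvABool_iff lst 0 (lst[0]'hn)).mp (by simpa using hA 0 hn) hreg).1.1
          exact h0 rfl
      · cases hreg : regular_opt (lst[lst.length - 1]'(by omega)) with
        | false => rfl
        | true =>
          exfalso
          have hl := ((pvABool_iff lst ((lst.length - 1 : Nat) : Int) _).mp
            (hA (lst.length - 1) (by omega)) hreg).1.2
          exact hl (by omega)
      · intro k hk
        rw [pvPair_iff]
        constructor
        · intro hreg
          have hAk := (pvABool_iff lst (k : Int) (lst[k]'(by omega))).mp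
            (hA k (by omega)) hreg
          have hlt : (k : Int) < (lst.length : Int) - 1 := by omega
          have hnx := hAk.2.1 hlt
          have hcast : (k : Int) + 1 = ((k + 1 : Nat) : Int) := by push_cast; ring
          rw [hcast, pvGet_nat lst (k + 1) hk] at hnx
          exact hnx
        · intro hreg
          have hAk1 := (pvABool_iff lst ((k + 1 : Nat) : Int) (lst[k + 1]'hk)).mp
            (hA (k + 1) hk) hreg
          have hpv := hAk1.2.2
          have hcast : ((k + 1 : Nat) : Int) - 1 = ((k : Nat) : Int) := by push_cast; ring
          rw [hcast, pvGet_nat lst k (by omega)] at hpv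
          exact hpv
    · -- B passes → A passes
      rintro ⟨hb1, hb2, hp⟩ k hk
      rw [pvABool_iff]
      intro hreg
      have hk0 : k ≠ 0 := by
        intro h0
        have : regular_opt (lst[0]'hn) = true := by simp only [← h0]; exact hreg
        exact Bool.noConfusion (this.symm.trans hb1)
      have hklast : k ≠ lst.length - 1 := by
        intro hkl
        have : regular_opt (lst[lst.length - 1]'(by omega)) = true := by
          simp only [← hkl]; exact hreg
        exact Bool.noConfusion (this.symm.trans hb2)
      have hk1 : k + 1 < lst.length := by omega
      have hnext := ((pvPair_iff (lst[k]'(by omega)) (lst[k + 1]'hk1)).mp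
        (hp k hk1)).1 hreg
      have hprevP := hp (k - 1) (by omega)
      have hkm : k - 1 + 1 = k := by omega
      simp only [hkm] at hprevP
      have hprev := ((pvPair_iff (lst[k - 1]'(by omega)) (lst[k]'(by omega))).mp
        hprevP).2 hreg
      refine ⟨⟨by omega, by omega⟩, fun _ => ?_, ?_⟩
      · have hcast : (k : Int) + 1 = ((k + 1 : Nat) : Int) := by push_cast; ring
        rw [hcast, pvGet_nat lst (k + 1) hk1]
        exact hnext
      · have hcast : (k : Int) - 1 = ((k - 1 : Nat) : Int) := by omega
        rw [hcast, pvGet_nat lst (k - 1) (by omega)]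
        exact hprev

-- ===== VERDICT (by name: the statement is the Claim_ definition above) =====
theorem valid_binary_opt_spec : Claim_equal_valid_binary_opt := by
  intro lst _
  exact pvMain lst
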